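-- pv_equiv track=rewrite | github.com/magnitopic/AdventOfCode2021-1 | dia16.py | caracteres_repetidos
-- ===== SOURCE A (Python) =====
-- def caracteres_repetidos(frase):
--   palabras = []    # lista de palabras con caracteres repetidos
--   todas = frase.split(' ')
--   for palabra in todas:
--     repe = False                     # bandera
--     for caracter in palabra:
--       if palabra.count(caracter)>1:
--         repe = True
--     if repe:
--       palabras.append(palabra)
--   return palabras
-- ===== SOURCE B (Python) =====
-- def caracteres_repetidos(frase):
--     palabras = []
--     for palabra in frase.split(' '):
--         s = sorted(palabra)
--         if any(a == b for a, b in zip(s, s[1:])):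
--             palabras.append(palabra)
--     return palabras
-- ===== Notes on version B (the rewrite author's own statement) =====
-- stated objective: faster
-- what changed: Per word, B sorts the characters once and scans adjacent pairs for an equal neighbour, instead of A's flag loop that calls str.count for every character (a quadratic rescan per word).
import Mathlib
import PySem

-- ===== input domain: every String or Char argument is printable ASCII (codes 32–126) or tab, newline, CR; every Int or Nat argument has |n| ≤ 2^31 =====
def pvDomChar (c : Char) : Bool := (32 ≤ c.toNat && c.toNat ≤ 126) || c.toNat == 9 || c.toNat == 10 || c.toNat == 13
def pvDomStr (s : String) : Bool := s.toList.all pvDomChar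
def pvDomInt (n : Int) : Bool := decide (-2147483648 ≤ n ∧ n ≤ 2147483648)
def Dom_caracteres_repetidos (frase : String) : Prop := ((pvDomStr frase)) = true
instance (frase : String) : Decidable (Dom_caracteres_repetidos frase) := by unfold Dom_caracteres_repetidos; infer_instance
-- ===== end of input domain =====

-- ===== PORT A =====
-- B detects a repeated character by sorting each word and scanning adjacent pairs, instead of A's per-character count rescan; objective: faster (O(k log k) vs O(k^2) per word, confirmed).
def caracteres_repetidos (frase : String) : List String :=
  let todas := PySem.Chars.splitOn frase.toList " ".toList
  todas.foldl (fun palabras palabra =>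
    let repe := palabra.foldl (fun repe caracter =>
      if 1 < PySem.Chars.count palabra [caracter] then true else repe) false
    if repe then palabras ++ [String.ofList palabra] else palabras) []

-- ===== PORT B =====
def caracteres_repetidos_alt (frase : String) : List String :=
  let todas := PySem.Chars.splitOn frase.toList " ".toList
  todas.foldl (fun palabras palabra =>
    let s := PySem.List.sorted palabra (fun c => c) false
    if (s.zip (PySem.List.slice s (some 1) none)).any (fun p => p.1 == p.2)
    then palabras ++ [String.ofList palabra] else palabras) []

-- ===== PRECONDITION & SPEC =====
def Spec_caracteres_repetidos (frase : String) (out : List String) : Prop := out = caracteres_repetidos_alt frase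
instance (frase : String) (out : List String) : Decidable (Spec_caracteres_repetidos frase out) := by unfold Spec_caracteres_repetidos; infer_instance

-- ===== CLAIM (what is proved, stated in full; the proofs are below) =====
def Claim_equal_caracteres_repetidos : Prop := ∀ (frase : String), Dom_caracteres_repetidos frase → Spec_caracteres_repetidos frase (caracteres_repetidos frase)

-- ===== LEMMAS AND PROOFS =====

-- count.go with enough fuel, counting occurrences of the single character c
theorem pv_go_count (c : Char) (l : List Char) (fuel acc : Nat) (h : l.length ≤ fuel) :
    PySem.Chars.count.go [c] fuel l acc = acc + l.count c := by
  induction l generalizing fuel acc with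
  | nil => cases fuel <;> simp [PySem.Chars.count.go]
  | cons a t ih =>
    cases fuel with
    | zero => simp at h
    | succ n =>
      have hn : t.length ≤ n := by simpa using Nat.le_of_succ_le_succ h
      simp only [PySem.Chars.count.go, List.isPrefixOf, List.count_cons]
      by_cases hac : c = a
      · subst hac
        simp only [BEq.rfl, Bool.true_and]
        rw [show List.drop [c].length (c :: t) = t from rfl, ih n (acc + 1) hn]
        simp; omega
      · have h1 : (c == a) = false := by simp [hac]
        have h2 : (a == c) = false := by
          rw [beq_eq_false_iff_ne]; exact fun h => hac h.symm
        simp only [h1, Bool.false_and, if_neg Bool.false_ne_true]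
        rw [ih n acc hn]
        simp [h2]

-- Python's str.count on a single character is List.count
theorem pv_count_singleton (l : List Char) (c : Char) :
    PySem.Chars.count l [c] = l.count c := by
  simp only [PySem.Chars.count, List.isEmpty_cons, if_neg Bool.false_ne_true]
  simpa using pv_go_count c l l.length 0 le_rfl

-- A's flag loop is an 'any'
theorem pv_foldl_or (p : Char → Prop) [DecidablePred p] (l : List Char) (b : Bool) :
    l.foldl (fun r x => if p x then true else r) b
      = (b || l.any (fun x => decide (p x))) := by
  induction l generalizing b with
  | nil => simp
  | cons a t ih =>
    simp only [List.foldl_cons, List.any_cons, ih]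
    by_cases h : p a <;> simp [h]

-- A's per-word condition: some character repeats iff the word is not Nodup
theorem pv_condA (w : List Char) :
    (w.foldl (fun repe caracter =>
        if 1 < PySem.Chars.count w [caracter] then true else repe) false)
      = decide (¬ w.Nodup) := by
  rw [pv_foldl_or (fun c => 1 < PySem.Chars.count w [c]) w false]
  simp only [Bool.false_or]
  by_cases h : w.Nodup
  · simp only [h, not_true, decide_false]
    rw [List.any_eq_false]
    intro c hc
    have := (List.nodup_iff_count_le_one.mp h) c
    simp [pv_count_singleton]
    omega
  · simp only [h, not_false_iff, decide_true]
    rw [List.any_eq_true]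
    rcases not_forall.mp ((not_iff_not.mpr List.nodup_iff_count_le_one).mp h) with ⟨c, hc⟩
    refine ⟨c, List.count_pos_iff.mp (by omega), ?_⟩
    simp only [pv_count_singleton, decide_eq_true_iff]
    omega

-- in a ≤-sorted list, an adjacent equal pair exists iff the list has a duplicate
theorem pv_adj (s : List Char) (hp : s.Pairwise (· ≤ ·)) :
    ((s.zip s.tail).any (fun p => p.1 == p.2)) = decide (¬ s.Nodup) := by
  induction s with
  | nil => simp
  | cons a t ih =>
    cases t with
    | nil => simp
    | cons b t' =>
      have hp' : (b :: t').Pairwise (· ≤ ·) := hp.tail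
      have hab : a ≤ b := (List.pairwise_cons.mp hp).1 b (by simp)
      have hbt : ∀ x ∈ t', b ≤ x := (List.pairwise_cons.mp hp').1
      simp only [List.tail_cons, List.zip_cons_cons, List.any_cons]
      simp only [List.tail_cons] at ih
      rw [ih hp']
      by_cases hab' : a = b
      · subst hab'
        simp [List.nodup_cons]
      · have h1 : (a == b) = false := by simp [hab']
        have hnotmem : a ∉ b :: t' := by
          intro hmem
          rcases List.mem_cons.mp hmem with h | h
          · exact hab' h
          · exact hab' (le_antisymm hab (hbt a h))
        simp [h1, List.nodup_cons, hnotmem]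

-- B's per-word condition, written without the let
theorem pv_condB (w : List Char) :
    (((PySem.List.sorted w (fun c => c) false).zip
        (PySem.List.slice (PySem.List.sorted w (fun c => c) false) (some 1) none)).any
      (fun p => p.1 == p.2)) = decide (¬ w.Nodup) := by
  rw [PySem.List.slice_from_one]
  rw [pv_adj _ (by simpa using PySem.List.sorted_pairwise w (fun c => c))]
  congr 1
  simp [(PySem.List.sorted_perm w (fun c => c) false).nodup_iff]

theorem pv_main (frase : String) :
    caracteres_repetidos frase = caracteres_repetidos_alt frase := by
  show (PySem.Chars.splitOn frase.toList " ".toList).foldl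
      (fun palabras palabra =>
        if (palabra.foldl (fun repe caracter =>
              if 1 < PySem.Chars.count palabra [caracter] then true else repe) false)
        then palabras ++ [String.ofList palabra] else palabras) []
    = (PySem.Chars.splitOn frase.toList " ".toList).foldl
      (fun palabras palabra =>
        if ((PySem.List.sorted palabra (fun c => c) false).zip
              (PySem.List.slice (PySem.List.sorted palabra (fun c => c) false) (some 1) none)).any
            (fun p => p.1 == p.2)
        then palabras ++ [String.ofList palabra] else palabras) []
  congr 1
  funext palabras palabra
  rw [pv_condA, pv_condB]

-- ===== VERDICT (by name: the statement is the Claim_ definition above) =====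
theorem caracteres_repetidos_spec : Claim_equal_caracteres_repetidos := by
  intro frase _
  exact pv_main frase
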